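-- pv_equiv track=rewrite | github.com/yiiilonggg/LeetCode | 2607. Make K-Subarray Sums Equal/Solution.py | makeSubKSumEqual
-- ===== SOURCE A (Python) =====
-- from typing import List
--
-- def makeSubKSumEqual(arr: List[int], k: int) -> int:
--     if k == 1:
--         a = sorted(arr)
--         median = a[len(a) // 2]
--         return sum([abs(a[i] - median) for i in range(len(a))])
--     total, n = 0, len(arr)
--     visited = [False for i in range(n)]
--     for i in range(n):
--         if visited[i]: continue
--         a = [arr[i]]
--         j = (i + k) % n
--         while j != i:
--             visited[j] = True
--             a.append(arr[j])
--             j = (j + k) % n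
--         a = sorted(a)
--         median = a[len(a) // 2]
--         total += sum([abs(a[i] - median) for i in range(len(a))])
--     return total
-- ===== SOURCE B (Python) =====
-- def _gcd(a, b):
--     a, b = abs(a), abs(b)
--     while b:
--         a, b = b, a % b
--     return a
--
-- def _cost(grp):
--     a = sorted(grp)
--     m = a[len(a) // 2]
--     return sum(abs(x - m) for x in a)
--
-- def makeSubKSumEqual(arr, k):
--     n = len(arr)
--     if n == 0:
--         return 0
--     g = _gcd(n, k)
--     buckets = [[] for _ in range(g)]
--     for i in range(n):
--         buckets[i % g].append(arr[i])
--     total = 0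
--     for grp in buckets:
--         total += _cost(grp)
--     return total
-- ===== Notes on version B (the rewrite author's own statement) =====
-- stated objective: simpler
-- what changed: Replaces A's cycle-following traversal with a visited array by direct grouping of indices into residue classes mod g = gcd(n, k) (step-k cycles are exactly the residue classes mod gcd(n,k)), then sums per-group median absolute deviations; dropping the visited bookkeeping and modular walking also makes it measurably faster by a constant factor.
-- crash fix: On arr = [] with k == 1 A raises IndexError (median of an empty list); B returns 0. — e.g. on makeSubKSumEqual([], 1): A raises IndexError, B returns 0
import Mathlib
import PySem

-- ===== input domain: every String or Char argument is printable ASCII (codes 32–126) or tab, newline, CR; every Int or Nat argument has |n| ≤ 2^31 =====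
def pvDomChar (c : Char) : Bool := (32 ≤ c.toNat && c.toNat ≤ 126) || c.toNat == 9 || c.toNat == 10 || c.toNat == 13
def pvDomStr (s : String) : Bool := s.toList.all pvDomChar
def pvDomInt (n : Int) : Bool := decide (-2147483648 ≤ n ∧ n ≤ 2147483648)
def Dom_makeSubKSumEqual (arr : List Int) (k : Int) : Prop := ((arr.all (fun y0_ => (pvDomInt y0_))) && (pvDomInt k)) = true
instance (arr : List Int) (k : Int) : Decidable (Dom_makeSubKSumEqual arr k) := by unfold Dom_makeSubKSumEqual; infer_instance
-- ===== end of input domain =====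

-- B replaces A's cycle-following traversal (visited array, step-k walks) by direct grouping of
-- indices into residue classes mod gcd(n, k); objective: simpler.

-- ===== PORT A =====
-- sorted-median cost: the three lines 'a = sorted(a); median = a[len(a)//2]; sum(abs(a[i]-median) ...)'
-- that A repeats verbatim in both branches
def pvCostA (grp : List Int) : Int :=
  let a := PySem.List.sorted grp (fun x => x) false
  let median := PySem.List.pyGetD a (PySem.Int.floordiv (PySem.List.len a) 2) 0
  ((PySem.List.pyRange 0 (PySem.List.len a) 1).map (fun i => |PySem.List.pyGetD a i 0 - median|)).sum

-- the 'while j != i' loop; fuel n is enough: the step-k cycle through i has at most n elements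
def pvCycleA (arr : List Int) (k n i : Int) : Nat → Int → List Bool → List Int → (List Bool × List Int)
  | 0, _, visited, a => (visited, a)
  | fuel+1, j, visited, a =>
    if j = i then (visited, a)
    else pvCycleA arr k n i fuel (PySem.Int.mod (j + k) n) (visited.set j.toNat true)
          (a ++ [PySem.List.pyGetD arr j 0])

def makeSubKSumEqual (arr : List Int) (k : Int) : Int :=
  if k = 1 then
    pvCostA arr
  else
    let n : Int := PySem.List.len arr
    ((PySem.List.pyRange 0 n 1).foldl (fun st i =>
        if PySem.List.pyGetD st.2 i false then st
        else
          let p := pvCycleA arr k n i arr.length (PySem.Int.mod (i + k) n) st.2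
                     [PySem.List.pyGetD arr i 0]
          (st.1 + pvCostA p.2, p.1))
      (0, List.replicate arr.length false)).1

-- ===== PORT B =====
-- hand-written Euclid from Source B: while b: a, b = b, a % b  (on absolute values)
def pvGcd (a b : Nat) : Nat :=
  if h : b = 0 then a else pvGcd b (a % b)
decreasing_by exact Nat.mod_lt _ (Nat.pos_of_ne_zero h)

def pvCostB (grp : List Int) : Int :=
  let a := PySem.List.sorted grp (fun x => x) false
  let m := PySem.List.pyGetD a (PySem.Int.floordiv (PySem.List.len a) 2) 0
  (a.map (fun x => |x - m|)).sum

def makeSubKSumEqual_alt (arr : List Int) (k : Int) : Int :=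
  if arr.length = 0 then 0
  else
    let g : Nat := pvGcd arr.length k.natAbs
    let buckets := (PySem.List.pyRange 0 (PySem.List.len arr) 1).foldl
        (fun b i => b.modify (PySem.Int.mod i (g : Int)).toNat
                      (fun l => l ++ [PySem.List.pyGetD arr i 0]))
        ((PySem.List.pyRange 0 (g : Int) 1).map (fun _ => ([] : List Int)))
    buckets.foldl (fun t grp => t + pvCostB grp) 0

-- ===== PRECONDITION & SPEC =====
-- Pre_ excludes only arr = [] with k = 1, where A raises IndexError (median of an empty list).
def Pre_makeSubKSumEqual (arr : List Int) (k : Int) : Prop := ¬(arr = [] ∧ k = 1)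
instance (arr : List Int) (k : Int) : Decidable (Pre_makeSubKSumEqual arr k) := by
  unfold Pre_makeSubKSumEqual; infer_instance
def pvWitness_makeSubKSumEqual : List Int × Int := ([1, 5, 2, 3], 2)

-- On arr = [] with k == 1 A raises IndexError (median of an empty list); B returns 0.
def Raises_makeSubKSumEqual (arr : List Int) (k : Int) : Prop := arr = [] ∧ k = 1
instance (arr : List Int) (k : Int) : Decidable (Raises_makeSubKSumEqual arr k) := by
  unfold Raises_makeSubKSumEqual; infer_instance
def pvRaiseWitness_makeSubKSumEqual : List Int × Int := ([], 1)
def pvRaiseWitnessOut_makeSubKSumEqual : Int := 0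

def Spec_makeSubKSumEqual (arr : List Int) (k : Int) (out : Int) : Prop := out = makeSubKSumEqual_alt arr k
instance (arr : List Int) (k : Int) (out : Int) : Decidable (Spec_makeSubKSumEqual arr k out) := by
  unfold Spec_makeSubKSumEqual; infer_instance

-- ===== CLAIM (what is proved, stated in full; the proofs are below) =====
def Claim_equal_makeSubKSumEqual : Prop := ∀ (arr : List Int) (k : Int), Dom_makeSubKSumEqual arr k → Pre_makeSubKSumEqual arr k → Spec_makeSubKSumEqual arr k (makeSubKSumEqual arr k)
def Claim_raises_makeSubKSumEqual : Prop := (∀ (arr : List Int) (k : Int), Dom_makeSubKSumEqual arr k → Raises_makeSubKSumEqual arr k → ¬ Pre_makeSubKSumEqual arr k) ∧ (Dom_makeSubKSumEqual (pvRaiseWitness_makeSubKSumEqual.1) (pvRaiseWitness_makeSubKSumEqual.2) ∧ Raises_makeSubKSumEqual (pvRaiseWitness_makeSubKSumEqual.1) (pvRaiseWitness_makeSubKSumEqual.2) ∧ makeSubKSumEqual_alt (pvRaiseWitness_makeSubKSumEqual.1) (pvRaiseWitness_makeSubKSumEqual.2) = pvRaiseWitnessOut_makeSubKSumEqual)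

-- ===== LEMMAS AND PROOFS =====

-- proof-side abbreviations
def pvF (i k : Int) (n : Nat) (t : Nat) : Int := (i + t * k) % (n : Int)
def pvOrbit (i k : Int) (n g : Nat) : List Nat :=
  (List.range (n / g)).map (fun t => (pvF i k n t).toNat)
def pvClass (n g r : Nat) : List Nat := (List.range n).filter (fun j => j % g = r)
def pvBucket (arr : List Int) (g r : Nat) : List Int :=
  (pvClass arr.length g r).map (fun j => arr.getD j 0)
def pvVState (n g m : Nat) : List Bool :=
  (List.range n).map (fun j => decide (j % g < m ∧ g ≤ j))

theorem pvGcd_eq (b a : Nat) : pvGcd a b = Nat.gcd a b := by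
  induction b using Nat.strong_induction_on generalizing a with
  | _ b ih =>
    unfold pvGcd
    split
    · rename_i h; subst h; simp
    · rename_i h
      rw [ih (a % b) (Nat.mod_lt _ (Nat.pos_of_ne_zero h)) b,
        Nat.gcd_comm a b, Nat.gcd_rec b a, Nat.gcd_comm]

theorem pvCost_eq (l : List Int) : pvCostA l = pvCostB l := by
  unfold pvCostA pvCostB
  dsimp only
  set a := PySem.List.sorted l (fun x => x) false with ha
  set m := PySem.List.pyGetD a (PySem.Int.floordiv (PySem.List.len a) 2) 0 with hm
  rw [show (fun i => |PySem.List.pyGetD a i 0 - m|)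
        = (fun x => |x - m|) ∘ (fun j => PySem.List.pyGetD a j 0) from rfl,
    ← List.map_map, PySem.List.map_pyGetD_pyRange_zero]

theorem pvCostB_perm {l l' : List Int} (h : l.Perm l') : pvCostB l = pvCostB l' := by
  unfold pvCostB
  rw [PySem.List.sorted_eq_sorted_of_perm l l' (fun x => x) (fun _ _ h => h) h]

-- n ∣ d*k ↔ (n/gcd n |k|) ∣ d
theorem pv_dvd_iff {n : Nat} (hn : 0 < n) (k : Int) (d : Nat) :
    ((n : Int) ∣ (d : Int) * k) ↔ (n / Nat.gcd n k.natAbs) ∣ d := by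
  set K := k.natAbs with hK
  set g := Nat.gcd n K with hg
  have hg0 : 0 < g := Nat.gcd_pos_of_pos_left _ hn
  have hgl : g ∣ n := Nat.gcd_dvd_left _ _
  have hgr : g ∣ K := Nat.gcd_dvd_right _ _
  have h1 : ((n : Int) ∣ (d : Int) * k) ↔ n ∣ d * K := by
    rw [← Int.natAbs_dvd_natAbs, Int.natAbs_mul, Int.natAbs_natCast, Int.natAbs_natCast]
  rw [h1]
  constructor
  · intro hdvd
    have hcop : (n / g).Coprime (K / g) := Nat.coprime_div_gcd_div_gcd hg0
    have h2 : g * (n / g) ∣ g * (d * (K / g)) := by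
      rw [Nat.mul_div_cancel' hgl]
      have : d * K = g * (d * (K / g)) := by
        conv_lhs => rw [← Nat.mul_div_cancel' hgr]
        ring
      exact this ▸ hdvd
    have h3 : (n / g) ∣ d * (K / g) := (Nat.mul_dvd_mul_iff_left hg0).mp h2
    exact hcop.dvd_of_dvd_mul_right h3
  · rintro ⟨e, he⟩
    obtain ⟨m, hm⟩ := hgr
    refine ⟨e * m, ?_⟩
    have hn2 : n / g * g = n := Nat.div_mul_cancel hgl
    rw [he, hm]
    conv_rhs => rw [← hn2]
    ring

theorem pvF_succ (i k : Int) (n : Nat) (t : Nat) :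
    pvF i k n (t + 1) = (pvF i k n t + k) % (n : Int) := by
  unfold pvF
  conv_rhs => rw [Int.emod_add_emod]
  congr 1
  push_cast
  ring

theorem pvF_bounds {n : Nat} (hn : 0 < n) (i k : Int) (t : Nat) :
    0 ≤ pvF i k n t ∧ pvF i k n t < (n : Int) := by
  have hn' : (0 : Int) < (n : Int) := by exact_mod_cast hn
  exact ⟨Int.emod_nonneg _ (by omega), Int.emod_lt_of_pos _ hn'⟩

theorem pvF_zero {n : Nat} (i k : Int) (h0 : 0 ≤ i) (h1 : i < (n : Int)) :
    pvF i k n 0 = i := by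
  show (i + ((0 : Nat) : Int) * k) % (n : Int) = i
  push_cast
  rw [zero_mul, add_zero]
  exact Int.emod_eq_of_lt h0 h1

theorem pvF_eq_iff {n : Nat} (hn : 0 < n) (i k : Int) (t s : Nat) (hts : s ≤ t) :
    pvF i k n t = pvF i k n s ↔ (n / Nat.gcd n k.natAbs) ∣ (t - s) := by
  unfold pvF
  rw [Int.emod_eq_emod_iff_emod_sub_eq_zero, PySem.Int.emod_eq_zero_iff_dvd,
    show i + (t : Int) * k - (i + (s : Int) * k) = ((t - s : Nat) : Int) * k by push_cast [hts]; ring]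
  exact pv_dvd_iff hn k (t - s)

theorem pvF_res {n : Nat} (hn : 0 < n) (i k : Int) (h0 : 0 ≤ i) (t : Nat) :
    (pvF i k n t).toNat % Nat.gcd n k.natAbs = i.toNat % Nat.gcd n k.natAbs := by
  set g := Nat.gcd n k.natAbs with hg
  have hg0 : 0 < g := Nat.gcd_pos_of_pos_left _ hn
  have hgn : ((g : Int)) ∣ (n : Int) := Int.natCast_dvd_natCast.mpr (Nat.gcd_dvd_left _ _)
  have hgk : ((g : Int)) ∣ k :=
    dvd_trans (Int.natCast_dvd_natCast.mpr (Nat.gcd_dvd_right _ _)) (Int.natAbs_dvd.mpr dvd_rfl)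
  obtain ⟨m, hm⟩ := hgk
  have h1 : pvF i k n t % (g : Int) = i % (g : Int) := by
    unfold pvF
    rw [Int.emod_emod_of_dvd _ hgn, hm,
      show i + (t : Int) * ((g : Int) * m) = i + (g : Int) * ((t : Int) * m) from by ring,
      Int.add_mul_emod_self_left]
  have hb := pvF_bounds hn i k t
  have h2 : (((pvF i k n t).toNat : Int)) % (g : Int) = ((i.toNat : Int)) % (g : Int) := by
    rw [Int.toNat_of_nonneg hb.1, Int.toNat_of_nonneg h0]
    exact h1
  omega

theorem pvClass_mem (n g r j : Nat) : j ∈ pvClass n g r ↔ j < n ∧ j % g = r := by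
  simp [pvClass]

theorem pvFilter_range_eq (g r : Nat) (hr : r < g) :
    (List.range g).filter (fun x => x = r) = [r] := by
  induction g with
  | zero => omega
  | succ g ih =>
    rw [List.range_succ, List.filter_append]
    by_cases h : r = g
    · subst h
      rw [List.filter_eq_nil_iff.mpr (by intro a ha; simp at ha ⊢; omega)]
      simp
    · rw [ih (by omega)]
      simp [Ne.symm h]

theorem pvClass_len_aux (g r : Nat) (hr : r < g) :
    ∀ c, (pvClass (g * c) g r).length = c := by
  intro c
  induction c with
  | zero => simp [pvClass]
  | succ c ih =>
    rw [show g * (c + 1) = g * c + g from by ring]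
    unfold pvClass at ih ⊢
    rw [List.range_add, List.filter_append, List.length_append, ih, List.filter_map,
      List.filter_congr (q := fun x => decide (x = r))
        (by intro x hx
            simp only [List.mem_range] at hx
            simp only [Function.comp]
            rw [Nat.mul_add_mod, Nat.mod_eq_of_lt hx]),
      pvFilter_range_eq g r hr]
    simp

theorem pvClass_len {n g : Nat} (hg : g ∣ n) (r : Nat) (hr : r < g) :
    (pvClass n g r).length = n / g := by
  obtain ⟨c, rfl⟩ := hg
  rw [Nat.mul_div_cancel_left _ (by omega), pvClass_len_aux g r hr]

theorem pvOrbit_nodup {n : Nat} (hn : 0 < n) (i k : Int) :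
    (pvOrbit i k n (Nat.gcd n k.natAbs)).Nodup := by
  refine List.Nodup.map_on ?_ List.nodup_range
  intro t ht s hs hts
  rw [List.mem_range] at ht hs
  have hbt := pvF_bounds hn i k t
  have hbs := pvF_bounds hn i k s
  have heq : pvF i k n t = pvF i k n s := by omega
  rcases le_total s t with h | h
  · have hd := (pvF_eq_iff hn i k t s h).mp heq
    by_cases h' : t = s
    · exact h'
    · have := Nat.le_of_dvd (by omega) hd
      omega
  · have hd := (pvF_eq_iff hn i k s t h).mp heq.symm
    by_cases h' : t = s
    · exact h'
    · have := Nat.le_of_dvd (by omega) hd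
      omega

theorem pvOrbit_perm_class {n : Nat} (hn : 0 < n) (i k : Int) (h0 : 0 ≤ i) (h1 : i < (n : Int)) :
    (pvOrbit i k n (Nat.gcd n k.natAbs)).Perm
      (pvClass n (Nat.gcd n k.natAbs) (i.toNat % Nat.gcd n k.natAbs)) := by
  set g := Nat.gcd n k.natAbs with hg
  have hg0 : 0 < g := Nat.gcd_pos_of_pos_left _ hn
  have hgn : g ∣ n := Nat.gcd_dvd_left _ _
  have hsub : pvOrbit i k n g ⊆ pvClass n g (i.toNat % g) := by
    intro j hj
    obtain ⟨t, _, rfl⟩ := List.mem_map.mp hj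
    have hb := pvF_bounds hn i k t
    rw [pvClass_mem]
    refine ⟨by omega, ?_⟩
    exact pvF_res hn i k h0 t
  have hlen : (pvClass n g (i.toNat % g)).length ≤ (pvOrbit i k n g).length := by
    rw [pvClass_len hgn _ (Nat.mod_lt _ hg0)]
    simp [pvOrbit]
  exact List.Subperm.perm_of_length_le ((pvOrbit_nodup hn i k).subperm hsub) hlen

theorem pvFoldSet_length (js : List Nat) (v : List Bool) :
    (js.foldl (fun v j => v.set j true) v).length = v.length := by
  induction js generalizing v with
  | nil => rfl
  | cons j js ih => rw [List.foldl_cons, ih, List.length_set]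

theorem pvFoldSet_getD (js : List Nat) (v : List Bool) (p : Nat) (hp : p < v.length) :
    (js.foldl (fun v j => v.set j true) v).getD p false
      = (v.getD p false || decide (p ∈ js)) := by
  induction js generalizing v with
  | nil => simp
  | cons j js ih =>
    rw [List.foldl_cons, ih _ (by rw [List.length_set]; exact hp)]
    by_cases h : j = p
    · subst h
      rw [List.getD_eq_getElem _ _ (by rw [List.length_set]; exact hp), List.getElem_set]
      simp
    · have hset : (v.set j true).getD p false = v.getD p false := by
        rw [List.getD_eq_getElem _ _ (by rw [List.length_set]; exact hp),
          List.getD_eq_getElem _ _ hp, List.getElem_set]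
        simp [h]
      rw [hset]
      simp [Ne.symm h]

theorem pvVState_zero (n g : Nat) : pvVState n g 0 = List.replicate n false := by
  unfold pvVState
  rw [List.map_congr_left (g := fun _ => false) (by simp), List.map_const', List.length_range]

theorem pvVState_length (n g m : Nat) : (pvVState n g m).length = n := by
  simp [pvVState]

theorem pvVState_getD (n g m p : Nat) (hp : p < n) :
    (pvVState n g m).getD p false = decide (p % g < m ∧ g ≤ p) :=
  PySem.List.getD_map_range _ _ _ _ hp

theorem pvOrbit_length (n g : Nat) (i k : Int) : (pvOrbit i k n g).length = n / g := by
  simp [pvOrbit]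

theorem pvOrbit_head {n : Nat} (hn : 0 < n) (i k : Int) (h0 : 0 ≤ i) (h1 : i < (n : Int)) :
    pvOrbit i k n (Nat.gcd n k.natAbs)
      = i.toNat :: (pvOrbit i k n (Nat.gcd n k.natAbs)).drop 1 := by
  set g := Nat.gcd n k.natAbs with hg
  have hg0 : 0 < g := Nat.gcd_pos_of_pos_left _ hn
  have hc : 0 < n / g := Nat.div_pos (Nat.le_of_dvd hn (Nat.gcd_dvd_left _ _)) hg0
  have hlen : 0 < (pvOrbit i k n g).length := by rw [pvOrbit_length]; exact hc
  have hdrop := List.drop_eq_getElem_cons (i := 0) (l := pvOrbit i k n g) hlen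
  rw [List.drop_zero] at hdrop
  rw [hdrop]
  congr 1
  show (List.map (fun t => (pvF i k n t).toNat) (List.range (n / g)))[0]'(by simpa [pvOrbit] using hlen) = i.toNat
  rw [List.getElem_map, List.getElem_range, pvF_zero i k h0 h1]

theorem pvMem_orbit_drop {n : Nat} (hn : 0 < n) (i k : Int) (h0 : 0 ≤ i) (h1 : i < (n : Int)) (p : Nat) :
    p ∈ (pvOrbit i k n (Nat.gcd n k.natAbs)).drop 1
      ↔ p ∈ pvOrbit i k n (Nat.gcd n k.natAbs) ∧ p ≠ i.toNat := by
  have hnd := pvOrbit_nodup hn i k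
  have hhead := pvOrbit_head hn i k h0 h1
  constructor
  · intro hp
    refine ⟨by rw [hhead]; exact List.mem_cons_of_mem _ hp, ?_⟩
    intro hcontra
    rw [hhead] at hnd
    exact (List.nodup_cons.mp hnd).1 (hcontra ▸ hp)
  · rintro ⟨hp, hne⟩
    rw [hhead] at hp
    rcases List.mem_cons.mp hp with h | h
    · exact absurd h hne
    · exact h

theorem pvVState_update {n : Nat} (hn : 0 < n) (k : Int) (m : Nat) (hm : m < Nat.gcd n k.natAbs) :
    ((pvOrbit (m : Int) k n (Nat.gcd n k.natAbs)).drop 1).foldl (fun v j => v.set j true)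
        (pvVState n (Nat.gcd n k.natAbs) m)
      = pvVState n (Nat.gcd n k.natAbs) (m + 1) := by
  set g := Nat.gcd n k.natAbs with hg
  have hg0 : 0 < g := by omega
  have hgn : g ∣ n := Nat.gcd_dvd_left _ _
  have hmn : m < n := lt_of_lt_of_le hm (Nat.le_of_dvd hn hgn)
  have h0 : (0 : Int) ≤ (m : Int) := by positivity
  have h1 : ((m : Int)) < (n : Int) := by exact_mod_cast hmn
  apply List.ext_getElem
  · rw [pvFoldSet_length, pvVState_length, pvVState_length]
  · intro p hp1 hp2
    have hpn : p < n := by rwa [pvVState_length] at hp2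
    rw [← List.getD_eq_getElem _ false hp1, ← List.getD_eq_getElem _ false hp2,
      pvFoldSet_getD _ _ _ (by rw [pvVState_length]; exact hpn),
      pvVState_getD _ _ _ _ hpn, pvVState_getD _ _ _ _ hpn]
    have hmem : p ∈ (pvOrbit (m : Int) k n g).drop 1 ↔ (p % g = m ∧ p ≠ m) := by
      rw [pvMem_orbit_drop hn _ k h0 h1,
        (pvOrbit_perm_class hn _ k h0 h1).mem_iff, pvClass_mem,
        Int.toNat_natCast, Nat.mod_eq_of_lt hm]
      constructor
      · rintro ⟨⟨_, hr⟩, hne⟩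
        exact ⟨hr, hne⟩
      · rintro ⟨hr, hne⟩
        exact ⟨⟨hpn, hr⟩, hne⟩
    rw [show (decide (p ∈ (pvOrbit (m : Int) k n g).drop 1)) = decide (p % g = m ∧ p ≠ m)
         from decide_eq_decide.mpr hmem]
    rw [Bool.eq_iff_iff]
    simp only [Bool.or_eq_true, decide_eq_true_eq]
    have h2 : p % g < g := Nat.mod_lt _ hg0
    have h3 : p % g = p ∨ g ≤ p := by
      rcases Nat.lt_or_ge p g with h | h
      · exact Or.inl (Nat.mod_eq_of_lt h)
      · exact Or.inr h
    rw [hg] at h2 h3 hm ⊢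
    generalize p % Nat.gcd n k.natAbs = x at h2 h3 ⊢
    omega

theorem pvCycle_go (arr : List Int) (k i : Int) (n g c : Nat)
    (hnn : n = arr.length) (hg : g = Nat.gcd n k.natAbs) (hc : c = n / g)
    (hn : 0 < n) (h0 : 0 ≤ i) (h1 : i < (n : Int)) :
    ∀ (fuel t : Nat), 1 ≤ t → t ≤ c → c - t ≤ fuel →
      ∀ (v : List Bool) (a : List Int),
      pvCycleA arr k (n : Int) i fuel (pvF i k n t) v a
        = (((pvOrbit i k n g).drop t).foldl (fun v j => v.set j true) v,
           a ++ ((pvOrbit i k n g).drop t).map (fun j => arr.getD j 0)) := by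
  intro fuel
  have hg0 : 0 < g := by rw [hg]; exact Nat.gcd_pos_of_pos_left _ hn
  have horb : (pvOrbit i k n g).length = c := by rw [pvOrbit_length, hc]
  have hFc : pvF i k n c = i := by
    have h' : pvF i k n c = pvF i k n 0 := by
      refine (pvF_eq_iff hn i k c 0 (Nat.zero_le _)).mpr ?_
      rw [Nat.sub_zero, hc, hg]
    rw [h', pvF_zero i k h0 h1]
  induction fuel with
  | zero =>
    intro t ht1 htc hfuel v a
    have htc' : t = c := by omega
    subst htc'
    show (v, a) = _
    rw [List.drop_of_length_le (by omega)]
    simp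
  | succ fuel ih =>
    intro t ht1 htc hfuel v a
    by_cases hteq : t = c
    · subst hteq
      rw [hFc]
      show (if i = i then (v, a) else _) = _
      rw [if_pos rfl, List.drop_of_length_le (by omega)]
      simp
    · have htlt : t < c := by omega
      have hne : pvF i k n t ≠ i := by
        intro hcontra
        have h' : pvF i k n t = pvF i k n 0 := by rw [hcontra, pvF_zero i k h0 h1]
        have hd := (pvF_eq_iff hn i k t 0 (Nat.zero_le _)).mp h'
        rw [Nat.sub_zero, ← hg, ← hc] at hd
        have := Nat.le_of_dvd (by omega) hd
        omega
      have hb := pvF_bounds hn i k t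
      show (if pvF i k n t = i then (v, a) else _) = _
      rw [if_neg hne]
      rw [PySem.Int.mod_eq_emod_of_pos (b := (n : Int)) (by exact_mod_cast hn),
        ← pvF_succ i k n t,
        PySem.List.pyGetD_of_nonneg arr 0 hb.1]
      rw [ih (t + 1) (by omega) (by omega) (by omega)]
      have hdrop : (pvOrbit i k n g).drop t
          = (pvF i k n t).toNat :: (pvOrbit i k n g).drop (t + 1) := by
        rw [List.drop_eq_getElem_cons (by omega)]
        congr 1
        show (List.map (fun t => (pvF i k n t).toNat) (List.range (n / g)))[t]'(by
          simpa [pvOrbit, ← hc] using htlt) = _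
        rw [List.getElem_map, List.getElem_range]
      rw [hdrop]
      simp

-- A's outer-loop body, named for the proofs (definitionally the lambda in the port)
def pvStepA (arr : List Int) (k : Int) (st : Int × List Bool) (i : Int) : Int × List Bool :=
  if PySem.List.pyGetD st.2 i false then st
  else
    let p := pvCycleA arr k (PySem.List.len arr) i arr.length (PySem.Int.mod (i + k) (PySem.List.len arr)) st.2
               [PySem.List.pyGetD arr i 0]
    (st.1 + pvCostA p.2, p.1)

theorem pvPhase1 (arr : List Int) (k : Int) (n g c : Nat) (hnn : n = arr.length)
    (hg : g = Nat.gcd n k.natAbs) (hc : c = n / g) (hn : 0 < n) :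
    ∀ (d m : Nat), m + d = g → ∀ (T : Int),
      (List.range' m d).foldl (fun st (i : Nat) => pvStepA arr k st (i : Int)) (T, pvVState n g m)
        = (T + ((List.range' m d).map (fun s => pvCostB (pvBucket arr g s))).sum, pvVState n g g) := by
  have hg0 : 0 < g := by rw [hg]; exact Nat.gcd_pos_of_pos_left _ hn
  have hgdvd : g ∣ n := by rw [hg]; exact Nat.gcd_dvd_left _ _
  have hgle : g ≤ n := Nat.le_of_dvd hn hgdvd
  have hc1 : 0 < c := by rw [hc]; exact Nat.div_pos hgle hg0
  have hcn : c ≤ n := by rw [hc]; exact Nat.div_le_self _ _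
  have hlen : PySem.List.len arr = (n : Int) := by rw [hnn]; rfl
  intro d
  induction d with
  | zero =>
    intro m hm T
    have : m = g := by omega
    subst this
    simp
  | succ d ih =>
    intro m hm T
    have hmg : m < g := by omega
    have hmn : m < n := by omega
    have h0 : (0 : Int) ≤ (m : Int) := by positivity
    have h1 : ((m : Int)) < (n : Int) := by exact_mod_cast hmn
    rw [List.range'_succ, List.foldl_cons]
    have hread : PySem.List.pyGetD (pvVState n g m) (m : Int) false = false := by
      rw [PySem.List.pyGetD_natCast, pvVState_getD n g m m hmn]
      simp
      omega
    have hstep : pvStepA arr k (T, pvVState n g m) (m : Int)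
        = (T + pvCostB (pvBucket arr g m), pvVState n g (m + 1)) := by
      unfold pvStepA
      rw [hread]
      simp only [Bool.false_eq_true, if_false]
      rw [hlen, hnn.symm]
      rw [show PySem.Int.mod ((m : Int) + k) (n : Int) = pvF (m : Int) k n 1 by
            rw [PySem.Int.mod_eq_emod_of_pos (by exact_mod_cast hn)]
            unfold pvF
            norm_num,
        pvCycle_go arr k (m : Int) n g c hnn hg hc hn h0 h1 n 1 le_rfl hc1 (by omega)]
      dsimp only
      have hupd := pvVState_update hn k m (hg ▸ hmg)
      rw [← hg] at hupd
      rw [hupd]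
      congr 1
      have hh := pvOrbit_head hn (m : Int) k h0 h1
      rw [← hg] at hh
      have hmap : [PySem.List.pyGetD arr (m : Int) 0]
            ++ ((pvOrbit (m : Int) k n g).drop 1).map (fun j => arr.getD j 0)
          = (pvOrbit (m : Int) k n g).map (fun j => arr.getD j 0) := by
        conv_rhs => rw [hh]
        rw [List.map_cons, PySem.List.pyGetD_natCast, Int.toNat_natCast]
        rfl
      rw [hmap, pvCost_eq]
      refine congrArg (T + ·) (pvCostB_perm ?_)
      have hperm := (pvOrbit_perm_class hn (m : Int) k h0 h1).map (fun j => arr.getD j 0)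
      rw [← hg] at hperm
      rw [Int.toNat_natCast, Nat.mod_eq_of_lt (hg ▸ hmg)] at hperm
      unfold pvBucket
      rw [← hnn]
      exact hperm
    rw [hstep, ih (m + 1) (by omega)]
    rw [List.map_cons, List.sum_cons]
    congr 1
    ring

theorem pvPhase2 (arr : List Int) (k : Int) (n g : Nat) (hg0 : 0 < g) :
    ∀ (d m : Nat), g ≤ m → m + d ≤ n → ∀ (T : Int),
      (List.range' m d).foldl (fun st (i : Nat) => pvStepA arr k st (i : Int)) (T, pvVState n g g)
        = (T, pvVState n g g) := by
  intro d
  induction d with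
  | zero => intro m _ _ T; rfl
  | succ d ih =>
    intro m hgm hmn T
    rw [List.range'_succ, List.foldl_cons]
    have hread : PySem.List.pyGetD (pvVState n g g) (m : Int) false = true := by
      rw [PySem.List.pyGetD_natCast, pvVState_getD n g g m (by omega)]
      have : m % g < g := Nat.mod_lt _ hg0
      simp
      omega
    have hstep : pvStepA arr k (T, pvVState n g g) (m : Int) = (T, pvVState n g g) := by
      unfold pvStepA
      rw [hread]
      simp
    rw [hstep, ih (m + 1) (by omega) (by omega)]

theorem pvModify_map_range (g r0 : Nat) (F : Nat → List Int) (x : Int) :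
    ((List.range g).map F).modify r0 (fun l => l ++ [x])
      = (List.range g).map (fun r => F r ++ (if r = r0 then [x] else [])) := by
  apply List.ext_getElem
  · simp
  · intro p hp1 hp2
    rw [List.getElem_modify, List.getElem_map, List.getElem_map]
    by_cases h : r0 = p
    · subst h; simp
    · simp [h, Ne.symm h]

theorem pvBuckets_build (arr : List Int) (g : Nat) (hg0 : 0 < g) :
    ∀ (m : Nat),
      (List.range m).foldl
          (fun b (i : Nat) => b.modify (PySem.Int.mod (i : Int) (g : Int)).toNat
            (fun l => l ++ [PySem.List.pyGetD arr (i : Int) 0]))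
          ((List.range g).map (fun _ => ([] : List Int)))
        = (List.range g).map
            (fun r => ((List.range m).filter (fun j => j % g = r)).map (fun j => arr.getD j 0)) := by
  intro m
  induction m with
  | zero => simp
  | succ m ih =>
    rw [List.range_succ, List.foldl_append, ih, List.foldl_cons, List.foldl_nil]
    rw [show (PySem.Int.mod ((m : Nat) : Int) (g : Int)).toNat = m % g by
          rw [PySem.Int.mod_eq_emod_of_pos (by exact_mod_cast hg0)]
          omega,
      PySem.List.pyGetD_natCast,
      pvModify_map_range g (m % g)]
    apply List.map_congr_left
    intro r hr
    rw [List.mem_range] at hr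
    rw [List.filter_append, List.map_append]
    congr 1
    by_cases h : m % g = r
    · simp [h]
    · have h' : ¬(r = m % g) := fun hh => h hh.symm
      simp [h, h']

theorem pvGetD_range (arr : List Int) :
    (List.range arr.length).map (fun j => arr.getD j 0) = arr := by
  have h := PySem.List.map_pyGetD_pyRange_zero arr 0
  rw [show PySem.List.len arr = ((arr.length : Nat) : Int) from rfl,
    PySem.List.pyRange_zero_natCast, List.map_map] at h
  conv_rhs => rw [← h]
  apply List.map_congr_left
  intro j hj
  simp [Function.comp, PySem.List.pyGetD_natCast]

theorem pvA_char (arr : List Int) (k : Int) (n g c : Nat) (hnn : n = arr.length)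
    (hg : g = Nat.gcd n k.natAbs) (hc : c = n / g) (hk : k ≠ 1) (hn : 0 < n) :
    makeSubKSumEqual arr k
      = ((List.range g).map (fun s => pvCostB (pvBucket arr g s))).sum := by
  have hg0 : 0 < g := by rw [hg]; exact Nat.gcd_pos_of_pos_left _ hn
  have hgle : g ≤ n := Nat.le_of_dvd hn (by rw [hg]; exact Nat.gcd_dvd_left _ _)
  unfold makeSubKSumEqual
  rw [if_neg hk]
  show (((PySem.List.pyRange 0 (PySem.List.len arr) 1)).foldl (pvStepA arr k)
      (0, List.replicate arr.length false)).1 = _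
  rw [show PySem.List.len arr = ((n : Nat) : Int) by rw [hnn]; rfl,
    PySem.List.pyRange_zero_natCast, List.foldl_map,
    show List.replicate arr.length false = pvVState n g 0 by rw [pvVState_zero, hnn]]
  have hsplit : List.range n = List.range' 0 g ++ List.range' g (n - g) := by
    rw [List.range_eq_range']
    have h := List.range'_append (s := 0) (m := g) (n := n - g) (step := 1)
    simp only [Nat.zero_add, Nat.one_mul] at h
    rw [Nat.add_sub_cancel' hgle] at h
    exact h.symm
  rw [hsplit, List.foldl_append,
    pvPhase1 arr k n g c hnn hg hc hn g 0 (by omega) 0,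
    pvPhase2 arr k n g hg0 (n - g) g le_rfl (by omega)]
  show (0 : Int) + _ = _
  rw [zero_add, List.range_eq_range']

theorem pvB_char (arr : List Int) (k : Int) (n g : Nat) (hnn : n = arr.length)
    (hg : g = Nat.gcd n k.natAbs) (hn : 0 < n) :
    makeSubKSumEqual_alt arr k
      = ((List.range g).map (fun r => pvCostB (pvBucket arr g r))).sum := by
  subst hnn
  have hg0 : 0 < g := by rw [hg]; exact Nat.gcd_pos_of_pos_left _ hn
  unfold makeSubKSumEqual_alt
  rw [if_neg (by omega : ¬ arr.length = 0)]
  dsimp only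
  rw [show pvGcd arr.length k.natAbs = g by rw [pvGcd_eq, ← hg],
    show PySem.List.len arr = ((arr.length : Nat) : Int) from rfl,
    PySem.List.pyRange_zero_natCast, PySem.List.pyRange_zero_natCast,
    List.map_map, List.foldl_map]
  simp only [Function.comp_def]
  rw [pvBuckets_build arr g hg0 arr.length, PySem.List.foldl_add, zero_add, List.map_map]
  congr 1

theorem pvB_one (arr : List Int) (hn : 0 < arr.length) :
    makeSubKSumEqual_alt arr 1 = pvCostB arr := by
  rw [pvB_char arr 1 arr.length 1 rfl (by simp) hn]
  rw [List.range_one, List.map_cons, List.map_nil, List.sum_cons, List.sum_nil, add_zero]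
  congr 1
  unfold pvBucket pvClass
  rw [List.filter_eq_self.mpr (by intro j _; simp [Nat.mod_one]), pvGetD_range]

-- ===== VERDICT (by name: the statement is the Claim_ definition above) =====
theorem makeSubKSumEqual_spec : Claim_equal_makeSubKSumEqual := by
  intro arr k _ hpre
  unfold Spec_makeSubKSumEqual
  by_cases hn0 : arr.length = 0
  · have harr : arr = [] := List.length_eq_zero_iff.mp hn0
    subst harr
    have hk : k ≠ 1 := fun h => hpre ⟨rfl, h⟩
    unfold makeSubKSumEqual
    rw [if_neg hk]
    rfl
  · have hn : 0 < arr.length := Nat.pos_of_ne_zero hn0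
    by_cases hk : k = 1
    · subst hk
      unfold makeSubKSumEqual
      rw [if_pos rfl, pvB_one arr hn, pvCost_eq]
    · rw [pvA_char arr k arr.length (Nat.gcd arr.length k.natAbs)
          (arr.length / Nat.gcd arr.length k.natAbs) rfl rfl rfl hk hn,
        pvB_char arr k arr.length (Nat.gcd arr.length k.natAbs) rfl rfl hn]

@[simp]
theorem makeSubKSumEqual_raises : Claim_raises_makeSubKSumEqual := by
  unfold Claim_raises_makeSubKSumEqual
  exact ⟨fun arr k _ hr hp => hp hr, by decide⟩
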